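-- pv_equiv track=rewrite | github.com/ekremtkan/micropython | datetime.py | _split_date_str
-- ===== SOURCE A (Python) =====
-- def _split_date_str(date_time:str):
--     d_l=[] #values
--     s_l=[] #seperators
--     s=""
--     for i in date_time:
--         if i.isdigit():
--             s='%s%s'%(s,i)
--         else:
--             d_l.append(int(s))
--             s=""
--             s_l.append(i)
--     if s:
--         d_l.append(int(s))
--     return d_l,s_l
-- ===== SOURCE B (Python) =====
-- def _split_date_str(date_time: str):
--     # span-based scan: slice out each maximal digit run instead of
--     # accumulating characters one by one
--     d_l, s_l = [], []
--     pos, n = 0, len(date_time)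
--     while pos < n:
--         m = pos
--         while m < n and date_time[m].isdigit():
--             m += 1
--         if m == n:
--             d_l.append(int(date_time[pos:]))
--             return d_l, s_l
--         d_l.append(int(date_time[pos:m]))
--         s_l.append(date_time[m])
--         pos = m + 1
--     return d_l, s_l
-- ===== Notes on version B (the rewrite author's own statement) =====
-- stated objective: alternative
-- what changed: A's char-by-char loop that grows a string accumulator and converts it at each separator is replaced by a span scanner that finds each maximal digit run, slices it out and converts the slice, advancing past the separator.
import Mathlib
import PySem

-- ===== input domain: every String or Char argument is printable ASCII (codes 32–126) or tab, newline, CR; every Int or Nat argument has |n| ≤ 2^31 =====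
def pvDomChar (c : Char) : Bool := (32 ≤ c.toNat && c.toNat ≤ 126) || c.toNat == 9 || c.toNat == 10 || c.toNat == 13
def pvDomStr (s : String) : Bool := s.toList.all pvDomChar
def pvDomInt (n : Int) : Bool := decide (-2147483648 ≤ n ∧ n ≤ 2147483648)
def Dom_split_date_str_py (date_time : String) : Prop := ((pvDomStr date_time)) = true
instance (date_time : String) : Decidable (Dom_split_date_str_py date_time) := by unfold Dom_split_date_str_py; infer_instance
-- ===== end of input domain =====

-- B rewrites A's char-by-char accumulator loop as a span scanner over maximal digit runs
-- (objective: alternative decomposition; same linear pass, different structure).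
-- Pre_ excludes exactly the inputs on which Python's converting an empty digit run raises ValueError in both programs.

-- ===== PORT A =====
-- int(s) (never called on an empty run under Pre_) is ported as (PySem.Int.ofChars? s).getD 0; under Pre_ the accumulator s is a
-- non-empty digit run at every conversion, so ofChars? is always `some` and the default is unreachable.
def split_date_str_py (date_time : String) : List Int × List String :=
  let r := date_time.toList.foldl
    (fun (acc : List Int × List String × List Char) i =>
      if PySem.Chars.isdigit i then
        (acc.1, acc.2.1, acc.2.2 ++ [i])              -- s = '%s%s' % (s, i)
      else
        (acc.1 ++ [(PySem.Int.ofChars? acc.2.2).getD 0],  -- d_l.append(int(s))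
         acc.2.1 ++ [String.ofList [i]],                      -- s_l.append(i)
         []))                                             -- s = ""
    ([], [], [])
  if r.2.2.isEmpty then (r.1, r.2.1)
  else (r.1 ++ [(PySem.Int.ofChars? r.2.2).getD 0], r.2.1)  -- if s: d_l.append(int(s))

-- ===== PORT B =====
-- The inner `while` computes m = end of the digit run starting at pos; working on the suffix
-- cs = date_time[pos:], that run is cs.takeWhile isdigit and date_time[m:] is cs.dropWhile isdigit
-- (exact: m - pos is the span length). The outer while-loop with accumulators is the tail recursion.
def splitB_go (cs : List Char) (d_l : List Int) (s_l : List String) :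
    List Int × List String :=
  if cs.isEmpty then (d_l, s_l)                       -- while pos < n  (exit)
  else
    match h : cs.dropWhile (fun c => PySem.Chars.isdigit c) with
    | [] => (d_l ++ [(PySem.Int.ofChars? cs).getD 0], s_l)   -- m == n: int(date_time[pos:])
    | r :: rs =>
        splitB_go rs
          (d_l ++ [(PySem.Int.ofChars? (cs.takeWhile (fun c => PySem.Chars.isdigit c))).getD 0])
          (s_l ++ [String.ofList [r]])
  termination_by cs.length
  decreasing_by
    have := List.length_dropWhile_le (fun c => PySem.Chars.isdigit c) cs
    rw [h] at this; simp at this; omega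

def split_date_str_py_alt (date_time : String) : List Int × List String :=
  splitB_go date_time.toList [] []

-- ===== PRECONDITION & SPEC =====
-- Pre_ excludes exactly the inputs where Python A raises ValueError (converting an empty digit run when a non-digit
-- character appears first or right after another non-digit); B raises there too.
def Pre_split_date_str_py (date_time : String) : Prop :=
  ((date_time.toList.take 1).all (fun c => PySem.Chars.isdigit c)
    && (date_time.toList.zip date_time.toList.tail).all
         (fun p => PySem.Chars.isdigit p.1 || PySem.Chars.isdigit p.2)) = true
instance (date_time : String) : Decidable (Pre_split_date_str_py date_time) := by
  unfold Pre_split_date_str_py; infer_instance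

def pvWitness_split_date_str_py : String := "12:34"

def Spec_split_date_str_py (date_time : String) (out : List Int × List String) : Prop :=
  out = split_date_str_py_alt date_time
instance (date_time : String) (out : List Int × List String) :
    Decidable (Spec_split_date_str_py date_time out) := by
  unfold Spec_split_date_str_py; infer_instance

-- ===== CLAIM (what is proved, stated in full; the proofs are below) =====
def Claim_equal_split_date_str_py : Prop :=
  ∀ (date_time : String), Dom_split_date_str_py date_time →
    Pre_split_date_str_py date_time →
      Spec_split_date_str_py date_time (split_date_str_py date_time)

-- ===== LEMMAS AND PROOFS =====

-- A's loop step and finalizer, named for the invariant proof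
def stepA (acc : List Int × List String × List Char) (i : Char) :
    List Int × List String × List Char :=
  if PySem.Chars.isdigit i then (acc.1, acc.2.1, acc.2.2 ++ [i])
  else (acc.1 ++ [(PySem.Int.ofChars? acc.2.2).getD 0], acc.2.1 ++ [String.ofList [i]], [])

def finA (acc : List Int × List String × List Char) : List Int × List String :=
  if acc.2.2.isEmpty then (acc.1, acc.2.1)
  else (acc.1 ++ [(PySem.Int.ofChars? acc.2.2).getD 0], acc.2.1)

lemma splitA_eq (date_time : String) :
    split_date_str_py date_time = finA (date_time.toList.foldl stepA ([], [], [])) := rfl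

-- B's scanner on a pure digit run just flushes it (or nothing, if empty)
lemma splitB_go_run (s : List Char) (hs : ∀ c ∈ s, PySem.Chars.isdigit c = true)
    (d : List Int) (sl : List String) :
    splitB_go s d sl =
      if s.isEmpty then (d, sl) else (d ++ [(PySem.Int.ofChars? s).getD 0], sl) := by
  rw [splitB_go]
  rcases s with _ | ⟨c, s'⟩
  · simp
  · have hdw : (c :: s').dropWhile (fun c => PySem.Chars.isdigit c) = [] := by
      rw [List.dropWhile_eq_nil_iff]; intro x hx; simpa using hs x hx
    simp only [List.isEmpty_cons, Bool.false_eq_true, if_false]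
    split
    · rfl
    · next r rs heq => rw [hdw] at heq; cases heq

-- B's scanner steps over one digit run and its following separator
lemma splitB_go_sep (s : List Char) (c : Char) (cs : List Char)
    (hs : ∀ x ∈ s, PySem.Chars.isdigit x = true) (hc : PySem.Chars.isdigit c = false)
    (d : List Int) (sl : List String) :
    splitB_go (s ++ c :: cs) d sl =
      splitB_go cs (d ++ [(PySem.Int.ofChars? s).getD 0]) (sl ++ [String.ofList [c]]) := by
  have hdw : (s ++ c :: cs).dropWhile (fun c => PySem.Chars.isdigit c) = c :: cs := by
    rw [List.dropWhile_append]
    have h1 : s.dropWhile (fun c => PySem.Chars.isdigit c) = [] := by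
      rw [List.dropWhile_eq_nil_iff]; intro x hx; simpa using hs x hx
    simp [h1, hc]
  have htw : (s ++ c :: cs).takeWhile (fun c => PySem.Chars.isdigit c) = s := by
    rw [List.takeWhile_append]
    have h1 : s.takeWhile (fun c => PySem.Chars.isdigit c) = s := by
      rw [List.takeWhile_eq_self_iff]; intro x hx; simpa using hs x hx
    simp [h1, hc]
  rw [splitB_go]
  have hne : (s ++ c :: cs).isEmpty = false := by simp
  simp only [hne, Bool.false_eq_true, if_false]
  split
  · next heq => rw [hdw] at heq; cases heq
  · next r rs heq =>
      rw [hdw] at heq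
      injection heq with h1 h2
      subst h1; subst h2
      rw [htw]

-- The loop invariant: processing the rest of the string with pending digit run s and
-- accumulated outputs (d, sl) equals B's scanner on s ++ rest with the same accumulators.
lemma invariant (cs : List Char) :
    ∀ (s : List Char) (d : List Int) (sl : List String),
      (∀ c ∈ s, PySem.Chars.isdigit c = true) →
      finA (cs.foldl stepA (d, sl, s)) = splitB_go (s ++ cs) d sl := by
  induction cs with
  | nil =>
    intro s d sl hs
    rw [List.foldl_nil, List.append_nil, splitB_go_run s hs]
    rcases s with _ | ⟨c, s'⟩ <;> simp [finA]
  | cons c cs ih =>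
    intro s d sl hs
    by_cases hc : PySem.Chars.isdigit c
    · have hstep : stepA (d, sl, s) c = (d, sl, s ++ [c]) := by simp [stepA, hc]
      rw [List.foldl_cons, hstep, ih (s ++ [c]) d sl (by
        intro x hx; rcases List.mem_append.1 hx with h | h
        · exact hs x h
        · simp at h; simpa [h] using hc)]
      simp
    · have hcf : PySem.Chars.isdigit c = false := by simpa using hc
      have hstep : stepA (d, sl, s) c =
          (d ++ [(PySem.Int.ofChars? s).getD 0], sl ++ [String.ofList [c]], []) := by
        simp [stepA, hcf]
      rw [List.foldl_cons, hstep, ih [] _ _ (by simp), List.nil_append,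
        splitB_go_sep s c cs hs hcf]

-- ===== VERDICT (by name: the statement is the Claim_ definition above) =====
theorem split_date_str_py_spec : Claim_equal_split_date_str_py := by
  intro date_time _ _
  unfold Spec_split_date_str_py split_date_str_py_alt
  rw [splitA_eq]
  simpa using invariant date_time.toList [] [] [] (by simp)
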